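-- pv_equiv track=rewrite | github.com/minz-cha/coding_test | 프로그래머스/lv0/120956. 옹알이 （1）/옹알이 （1）.py | solution
-- ===== SOURCE A (Python) =====
-- def solution(babbling):
--     answer = 0
--     words = ['aya', 'ye', 'woo', 'ma']
--
--     for i in babbling:
--         cnt = 0
--         for word in words:
--             if word in i:
--                 i = i.replace(word, ' ')
--                 cnt += 1
--
--         if (len(i.replace(" ", "")) == 0) and (cnt > 0):
--             answer += 1
--
--     return answer
-- ===== SOURCE B (Python) =====
-- def solution(babbling):
--     words = ("aya", "ye", "woo", "ma")
--     answer = 0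
--     for s in babbling:
--         pos, cnt, ok = 0, 0, True
--         while pos < len(s):
--             if s[pos] == ' ':
--                 pos += 1
--                 continue
--             for w in words:
--                 if s.startswith(w, pos):
--                     pos += len(w)
--                     cnt += 1
--                     break
--             else:
--                 ok = False
--                 break
--         if ok and cnt > 0:
--             answer += 1
--     return answer
-- ===== Notes on version B (the rewrite author's own statement) =====
-- stated objective: alternative
-- what changed: Per string, A runs four global str.replace passes (one per word, replacing with a space) and then tests that only spaces remain; B instead scans each string once left-to-right with an index, skipping spaces and matching one of the four words as a prefix at each position (their first letters are distinct), counting the string iff the scan consumes it entirely with at least one word matched.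
import Mathlib
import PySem

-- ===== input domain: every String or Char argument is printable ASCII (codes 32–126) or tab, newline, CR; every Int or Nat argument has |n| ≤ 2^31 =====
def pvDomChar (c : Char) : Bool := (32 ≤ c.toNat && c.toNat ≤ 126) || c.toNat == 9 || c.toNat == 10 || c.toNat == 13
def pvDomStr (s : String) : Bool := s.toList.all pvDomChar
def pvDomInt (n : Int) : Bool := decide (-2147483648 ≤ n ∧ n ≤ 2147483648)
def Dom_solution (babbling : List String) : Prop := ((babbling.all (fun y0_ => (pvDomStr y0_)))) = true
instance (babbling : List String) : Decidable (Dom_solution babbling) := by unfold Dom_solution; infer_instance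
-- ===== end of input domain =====

-- B replaces A's four global replace-passes per string by one left-to-right scan that skips
-- spaces (A's replace-with-space semantics treats spaces as separators) and matches one of the
-- four words as a prefix at each position (objective: alternative decomposition).

-- ===== PORT A =====
-- the body of A's inner `for word in words` loop, on the state (i, cnt)
def stepW (p : String × Int) (word : String) : String × Int :=
  if PySem.Str.isIn word p.1 then (PySem.Str.replace p.1 word " ", p.2 + 1) else p

def solution (babbling : List String) : Int :=
  babbling.foldl
    (fun answer i0 =>
      let p := List.foldl stepW (i0, (0 : Int)) ["aya", "ye", "woo", "ma"]
      if PySem.Str.len (PySem.Str.replace p.1 " " "") = 0 ∧ p.2 > 0 then answer + 1 else answer)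
    0

-- ===== PORT B =====
-- Source B's word tuple
def pyWords : List (List Char) := [['a','y','a'], ['y','e'], ['w','o','o'], ['m','a']]

-- Source B's inner while-loop: at the current position (= head of the remaining list) try the four
-- words in tuple order as a prefix (s.startswith(w, pos) = isPrefixOf on the remainder, find? =
-- the for/break ladder), advance past the first match and count it; `some cnt` = ok ended True.
-- The Nat argument is pure fuel (starts at the string length, one step consumes ≥ 1 character).
def scan : Nat → List Char → Int → Option Int
  | _, [], cnt => some cnt
  | 0, _ :: _, _ => none
  | fuel + 1, c :: t, cnt =>
    if c = ' ' then scan fuel t cnt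
    else
      match pyWords.find? (fun w => w.isPrefixOf (c :: t)) with
      | some w => scan fuel ((c :: t).drop w.length) (cnt + 1)
      | none => none

def solution_alt (babbling : List String) : Int :=
  babbling.foldl
    (fun answer s =>
      match scan s.toList.length s.toList 0 with
      | some cnt => if cnt > 0 then answer + 1 else answer
      | none => answer)
    0

-- ===== PRECONDITION & SPEC =====
def Spec_solution (babbling : List String) (out : Int) : Prop := out = solution_alt babbling
instance (babbling : List String) (out : Int) : Decidable (Spec_solution babbling out) := by
  unfold Spec_solution; infer_instance

-- ===== CLAIM (what is proved, stated in full; the proofs are below) =====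
def Claim_equal_solution : Prop :=
  ∀ (babbling : List String), Dom_solution babbling → Spec_solution babbling (solution babbling)

-- ===== LEMMAS AND PROOFS =====

-- the grammar both programs decide per string:
-- Tx s = true ↔ s is a concatenation of "aya", "ye", "woo", "ma" and spaces
def Tx : List Char → Bool
  | [] => true
  | ' ' :: r => Tx r
  | 'a' :: 'y' :: 'a' :: r => Tx r
  | 'y' :: 'e' :: r => Tx r
  | 'w' :: 'o' :: 'o' :: r => Tx r
  | 'm' :: 'a' :: r => Tx r
  | _ => false

-- left-to-right parse as structural recursion on the word patterns (proof device; the port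
-- `scan` is proved equal to it in scan_eq_parseGo below)
def parseGo : List Char → Option Int
  | [] => some 0
  | ' ' :: r => parseGo r
  | 'a' :: 'y' :: 'a' :: r => (parseGo r).map (· + 1)
  | 'y' :: 'e' :: r => (parseGo r).map (· + 1)
  | 'w' :: 'o' :: 'o' :: r => (parseGo r).map (· + 1)
  | 'm' :: 'a' :: r => (parseGo r).map (· + 1)
  | _ => none

lemma scan_eq_parseGo :
    ∀ (l : List Char) (fuel : Nat) (cnt : Int), l.length ≤ fuel →
      scan fuel l cnt = (parseGo l).map (fun n => cnt + n) := by
  intro l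
  fun_induction parseGo l with
  | case1 => intro fuel cnt _; cases fuel <;> simp [scan]
  | case2 r ih =>
    intro fuel cnt hl
    rcases fuel with _ | f
    · simp at hl
    simp only [List.length_cons] at hl
    rw [show scan (f + 1) (' ' :: r) cnt = scan f r cnt from rfl,
        ih f cnt (by omega)]
  | case3 r ih =>
    intro fuel cnt hl
    rcases fuel with _ | f
    · simp at hl
    simp only [List.length_cons] at hl
    rw [show scan (f + 1) ('a' :: 'y' :: 'a' :: r) cnt = scan f r (cnt + 1) from rfl,
        ih f (cnt + 1) (by omega)]
    cases parseGo r with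
    | none => simp
    | some m => simp; omega
  | case4 r ih =>
    intro fuel cnt hl
    rcases fuel with _ | f
    · simp at hl
    simp only [List.length_cons] at hl
    rw [show scan (f + 1) ('y' :: 'e' :: r) cnt = scan f r (cnt + 1) from rfl,
        ih f (cnt + 1) (by omega)]
    cases parseGo r with
    | none => simp
    | some m => simp; omega
  | case5 r ih =>
    intro fuel cnt hl
    rcases fuel with _ | f
    · simp at hl
    simp only [List.length_cons] at hl
    rw [show scan (f + 1) ('w' :: 'o' :: 'o' :: r) cnt = scan f r (cnt + 1) from rfl,
        ih f (cnt + 1) (by omega)]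
    cases parseGo r with
    | none => simp
    | some m => simp; omega
  | case6 r ih =>
    intro fuel cnt hl
    rcases fuel with _ | f
    · simp at hl
    simp only [List.length_cons] at hl
    rw [show scan (f + 1) ('m' :: 'a' :: r) cnt = scan f r (cnt + 1) from rfl,
        ih f (cnt + 1) (by omega)]
    cases parseGo r with
    | none => simp
    | some m => simp; omega
  | case7 x h1 h2 h3 h4 h5 h6 =>
    intro fuel cnt hl
    rcases x with _ | ⟨c, t⟩
    · exact (h1 rfl).elim
    rcases fuel with _ | f
    · simp at hl
    have hsp : c ≠ ' ' := fun h => h2 t (h ▸ rfl)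
    have e1 : (['a','y','a'].isPrefixOf (c :: t)) = false := by
      cases hpf : ['a','y','a'].isPrefixOf (c :: t)
      · rfl
      · obtain ⟨r, hr⟩ := List.isPrefixOf_iff_prefix.mp hpf
        simp only [List.cons_append, List.nil_append] at hr
        exact (h3 r hr.symm).elim
    have e2 : (['y','e'].isPrefixOf (c :: t)) = false := by
      cases hpf : ['y','e'].isPrefixOf (c :: t)
      · rfl
      · obtain ⟨r, hr⟩ := List.isPrefixOf_iff_prefix.mp hpf
        simp only [List.cons_append, List.nil_append] at hr
        exact (h4 r hr.symm).elim
    have e3 : (['w','o','o'].isPrefixOf (c :: t)) = false := by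
      cases hpf : ['w','o','o'].isPrefixOf (c :: t)
      · rfl
      · obtain ⟨r, hr⟩ := List.isPrefixOf_iff_prefix.mp hpf
        simp only [List.cons_append, List.nil_append] at hr
        exact (h5 r hr.symm).elim
    have e4 : (['m','a'].isPrefixOf (c :: t)) = false := by
      cases hpf : ['m','a'].isPrefixOf (c :: t)
      · rfl
      · obtain ⟨r, hr⟩ := List.isPrefixOf_iff_prefix.mp hpf
        simp only [List.cons_append, List.nil_append] at hr
        exact (h6 r hr.symm).elim
    have hfind : pyWords.find? (fun w => w.isPrefixOf (c :: t)) = none := by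
      rw [show pyWords = [['a','y','a'], ['y','e'], ['w','o','o'], ['m','a']] from rfl]
      simp [e1, e2, e3, e4]
    rw [show scan (f + 1) (c :: t) cnt
          = (if c = ' ' then scan f t cnt
             else
              match pyWords.find? (fun w => w.isPrefixOf (c :: t)) with
              | some w => scan f ((c :: t).drop w.length) (cnt + 1)
              | none => none) from rfl, if_neg hsp, hfind]
    rfl

-- str.replace(old, new) for old ≠ "" as a plain recursion (proved equal to PySem's below)
def repC (old new : List Char) : List Char → List Char
  | [] => []
  | c :: t =>
    if old.isPrefixOf (c :: t) then new ++ repC old new (t.drop (old.length - 1))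
    else c :: repC old new t
termination_by s => s.length
decreasing_by all_goals (simp [List.length_drop]; try omega)

lemma go_spec (old new : List Char) (hold : old ≠ []) :
    ∀ (fuel : Nat) (l : List Char), l.length ≤ fuel → ∀ acc,
      PySem.Chars.replace.go old new fuel l acc = acc.reverse ++ repC old new l := by
  intro fuel
  induction fuel with
  | zero =>
    intro l hl acc
    have : l = [] := List.eq_nil_of_length_eq_zero (Nat.le_zero.mp hl)
    subst this
    simp [PySem.Chars.replace.go, repC]
  | succ n ih =>
    intro l hl acc
    match l with
    | [] => simp [PySem.Chars.replace.go, repC]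
    | c :: t =>
      rw [PySem.Chars.replace.go]
      by_cases hp : old.isPrefixOf (c :: t)
      · simp only [hp, if_true]
        have h1 : 1 ≤ old.length := by
          cases old with | nil => exact absurd rfl hold | cons a b => simp
        have hlen : (List.drop old.length (c :: t)).length ≤ n := by
          simp only [List.length_drop, List.length_cons]
          simp only [List.length_cons] at hl
          omega
        rw [ih _ hlen]
        have hdrop : List.drop old.length (c :: t) = t.drop (old.length - 1) := by
          cases old with | nil => exact absurd rfl hold | cons a b => simp
        rw [hdrop, repC]
        simp [hp]
      · simp only [hp]
        have hlen : t.length ≤ n := by simpa using hl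
        rw [ih _ hlen]
        rw [repC]
        simp [hp]

lemma replace_eq_repC (old new : List Char) (hold : old ≠ []) (s : List Char) :
    PySem.Chars.replace s old new = repC old new s := by
  rw [PySem.Chars.replace]
  simp [List.isEmpty_iff, hold]
  exact go_spec old new hold s.length s le_rfl []

lemma repC_nil (old new : List Char) : repC old new [] = [] := by rw [repC]

lemma repC_pos (old new : List Char) (c : Char) (t : List Char)
    (hp : old.isPrefixOf (c :: t)) :
    repC old new (c :: t) = new ++ repC old new (t.drop (old.length - 1)) := by
  rw [repC]; simp [hp]

lemma repC_neg (old new : List Char) (c : Char) (t : List Char)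
    (hp : ¬ old.isPrefixOf (c :: t)) :
    repC old new (c :: t) = c :: repC old new t := by
  rw [repC]; simp [hp]

lemma repC_id_of_not_infix (w : List Char) :
    ∀ s, ¬ w <:+: s → repC w [' '] s = s := by
  intro s
  induction s with
  | nil => intro _; exact repC_nil _ _
  | cons c t ih =>
    intro h
    rw [repC_neg _ _ _ _ (fun hp => h (List.isPrefixOf_iff_prefix.mp hp).isInfix)]
    rw [ih (fun hi => h (List.infix_cons hi))]

-- head of a prefix match
lemma pref_head {a : Char} {ws Z : List Char} (h : (a :: ws).isPrefixOf Z = true) :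
    Z.head? = some a := by
  cases Z with
  | nil => simp [List.isPrefixOf] at h
  | cons b t =>
    simp only [List.isPrefixOf, Bool.and_eq_true, beq_iff_eq] at h
    simp [h.1]

lemma pref_head_ne {a : Char} {ws Z : List Char} (h : Z.head? ≠ some a) :
    ¬ (a :: ws).isPrefixOf Z = true := fun hp => h (pref_head hp)

lemma pref_snd_ne {a b : Char} {ws Z : List Char} (h : Z.head? ≠ some b) {c : Char}
    (hp : (a :: b :: ws).isPrefixOf (c :: Z) = true) : False := by
  cases Z with
  | nil => simp [List.isPrefixOf] at hp
  | cons d t =>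
    simp only [List.isPrefixOf, Bool.and_eq_true, beq_iff_eq] at hp
    exact h (by simp [hp.2.1])

lemma pref_trd_ne {a b c3 : Char} {ws Z : List Char} (h : Z.head? ≠ some c3) {c d : Char}
    (hp : (a :: b :: c3 :: ws).isPrefixOf (c :: d :: Z) = true) : False := by
  cases Z with
  | nil => simp [List.isPrefixOf] at hp
  | cons e t =>
    simp only [List.isPrefixOf, Bool.and_eq_true, beq_iff_eq] at hp
    exact h (by simp [hp.2.2.1])

lemma repC_head_sp (old : List Char) (s : List Char) :
    (repC old [' '] s).head? = some ' ' ∨ (repC old [' '] s).head? = s.head? := by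
  cases s with
  | nil => right; rw [repC_nil]
  | cons c t =>
    by_cases hp : old.isPrefixOf (c :: t)
    · left; rw [repC_pos _ _ _ _ hp]; rfl
    · right; rw [repC_neg _ _ _ _ hp]; rfl

lemma repC_head_ne (old : List Char) (s : List Char) {a : Char}
    (ha : a ≠ ' ') (hs : s.head? ≠ some a) : (repC old [' '] s).head? ≠ some a := by
  rcases repC_head_sp old s with h | h <;> rw [h]
  · simp [Ne.symm ha]
  · exact hs

-- A's four stages
def r1 (s : List Char) : List Char := repC ['a','y','a'] [' '] s
def r2 (s : List Char) : List Char := repC ['y','e'] [' '] s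
def r3 (s : List Char) : List Char := repC ['w','o','o'] [' '] s
def r4 (s : List Char) : List Char := repC ['m','a'] [' '] s
def chainR (s : List Char) : List Char := r4 (r3 (r2 (r1 s)))

-- stage equations
lemma r1_cons {c : Char} {t : List Char} (h : ¬ ['a','y','a'].isPrefixOf (c :: t) = true) :
    r1 (c :: t) = c :: r1 t := repC_neg _ _ _ _ h
lemma r2_cons {c : Char} {t : List Char} (h : ¬ ['y','e'].isPrefixOf (c :: t) = true) :
    r2 (c :: t) = c :: r2 t := repC_neg _ _ _ _ h
lemma r3_cons {c : Char} {t : List Char} (h : ¬ ['w','o','o'].isPrefixOf (c :: t) = true) :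
    r3 (c :: t) = c :: r3 t := repC_neg _ _ _ _ h
lemma r4_cons {c : Char} {t : List Char} (h : ¬ ['m','a'].isPrefixOf (c :: t) = true) :
    r4 (c :: t) = c :: r4 t := repC_neg _ _ _ _ h

lemma r1_aya (r : List Char) : r1 ('a' :: 'y' :: 'a' :: r) = ' ' :: r1 r := by
  rw [r1, repC_pos _ _ _ _ (by simp [List.isPrefixOf])]; rfl
lemma r2_ye (r : List Char) : r2 ('y' :: 'e' :: r) = ' ' :: r2 r := by
  rw [r2, repC_pos _ _ _ _ (by simp [List.isPrefixOf])]; rfl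
lemma r3_woo (r : List Char) : r3 ('w' :: 'o' :: 'o' :: r) = ' ' :: r3 r := by
  rw [r3, repC_pos _ _ _ _ (by simp [List.isPrefixOf])]; rfl
lemma r4_ma (r : List Char) : r4 ('m' :: 'a' :: r) = ' ' :: r4 r := by
  rw [r4, repC_pos _ _ _ _ (by simp [List.isPrefixOf])]; rfl

def allSp (l : List Char) : Prop := ∀ c ∈ l, c = ' '

lemma allSp_cons_sp {u : List Char} : allSp (' ' :: u) ↔ allSp u := by simp [allSp]

lemma allSp_cons_ne {c : Char} (hc : c ≠ ' ') (u : List Char) : ¬ allSp (c :: u) :=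
  fun h => hc (h c (by simp))

lemma chainR_nil : chainR [] = [] := by
  simp [chainR, r1, r2, r3, r4, repC_nil]

lemma chainR_cons_nomatch {c : Char} {t : List Char}
    (h1 : ¬ ['a','y','a'].isPrefixOf (c :: t) = true)
    (h2 : c ≠ 'y') (h3 : c ≠ 'w') (h4 : c ≠ 'm') :
    chainR (c :: t) = c :: chainR t := by
  rw [chainR, r1_cons h1,
      r2_cons (pref_head_ne (by simp [h2])),
      r3_cons (pref_head_ne (by simp [h3])),
      r4_cons (pref_head_ne (by simp [h4]))]
  rfl

lemma chainR_space (t : List Char) : chainR (' ' :: t) = ' ' :: chainR t :=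
  chainR_cons_nomatch (pref_head_ne (by simp)) (by decide) (by decide) (by decide)

lemma chainR_aya (r : List Char) : chainR ('a' :: 'y' :: 'a' :: r) = ' ' :: chainR r := by
  rw [chainR, r1_aya,
      r2_cons (pref_head_ne (by simp)),
      r3_cons (pref_head_ne (by simp)),
      r4_cons (pref_head_ne (by simp))]
  rfl

lemma chainR_ye (r : List Char) : chainR ('y' :: 'e' :: r) = ' ' :: chainR r := by
  rw [chainR, r1_cons (pref_head_ne (by simp)), r1_cons (pref_head_ne (by simp)),
      r2_ye,
      r3_cons (pref_head_ne (by simp)),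
      r4_cons (pref_head_ne (by simp))]
  rfl

lemma chainR_woo (r : List Char) : chainR ('w' :: 'o' :: 'o' :: r) = ' ' :: chainR r := by
  rw [chainR, r1_cons (pref_head_ne (by simp)), r1_cons (pref_head_ne (by simp)),
      r1_cons (pref_head_ne (by simp)),
      r2_cons (pref_head_ne (by simp)), r2_cons (pref_head_ne (by simp)),
      r2_cons (pref_head_ne (by simp)),
      r3_woo,
      r4_cons (pref_head_ne (by simp))]
  rfl

lemma chainR_ma (r : List Char) (hp : ¬ ['a','y','a'].isPrefixOf ('a' :: r) = true) :
    chainR ('m' :: 'a' :: r) = ' ' :: chainR r := by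
  rw [chainR, r1_cons (pref_head_ne (by simp)), r1_cons hp,
      r2_cons (pref_head_ne (by simp)), r2_cons (pref_head_ne (by simp)),
      r3_cons (pref_head_ne (by simp)), r3_cons (pref_head_ne (by simp)),
      r4_ma]
  rfl

-- fail cases: a head character no stage can erase survives to the end
lemma chainR_y_fail (t : List Char) (ht : t.head? ≠ some 'e') :
    ∃ u, chainR ('y' :: t) = 'y' :: u := by
  refine ⟨r4 (r3 (r2 (r1 t))), ?_⟩
  have hy2 : ¬ ['y','e'].isPrefixOf ('y' :: r1 t) = true :=
    fun hp => pref_snd_ne (Z := r1 t) (repC_head_ne ['a','y','a'] t (by decide) ht) hp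
  rw [chainR, r1_cons (pref_head_ne (by simp)), r2_cons hy2,
      r3_cons (pref_head_ne (by simp)),
      r4_cons (pref_head_ne (by simp))]

lemma chainR_w_fail1 (t : List Char) (ht : t.head? ≠ some 'o') :
    ∃ u, chainR ('w' :: t) = 'w' :: u := by
  refine ⟨r4 (r3 (r2 (r1 t))), ?_⟩
  have hw3 : ¬ ['w','o','o'].isPrefixOf ('w' :: r2 (r1 t)) = true :=
    fun hp => pref_snd_ne (Z := r2 (r1 t))
      (repC_head_ne ['y','e'] (r1 t) (by decide) (repC_head_ne ['a','y','a'] t (by decide) ht)) hp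
  rw [chainR, r1_cons (pref_head_ne (by simp)),
      r2_cons (pref_head_ne (by simp)), r3_cons hw3,
      r4_cons (pref_head_ne (by simp))]

lemma chainR_w_fail2 (u : List Char) (hu : u.head? ≠ some 'o') :
    ∃ v, chainR ('w' :: 'o' :: u) = 'w' :: 'o' :: v := by
  refine ⟨r4 (r3 (r2 (r1 u))), ?_⟩
  have hw3 : ¬ ['w','o','o'].isPrefixOf ('w' :: 'o' :: r2 (r1 u)) = true :=
    fun hp => pref_trd_ne (Z := r2 (r1 u))
      (repC_head_ne ['y','e'] (r1 u) (by decide) (repC_head_ne ['a','y','a'] u (by decide) hu)) hp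
  rw [chainR, r1_cons (pref_head_ne (by simp)), r1_cons (pref_head_ne (by simp)),
      r2_cons (pref_head_ne (by simp)), r2_cons (pref_head_ne (by simp)),
      r3_cons hw3,
      r3_cons (pref_head_ne (by simp)),
      r4_cons (pref_head_ne (by simp)), r4_cons (pref_head_ne (by simp))]

lemma chainR_m_fail (t : List Char) (ht : t.head? ≠ some 'a') :
    ∃ u, chainR ('m' :: t) = 'm' :: u := by
  refine ⟨r4 (r3 (r2 (r1 t))), ?_⟩
  have hm2 : ¬ ['m','a'].isPrefixOf ('m' :: r3 (r2 (r1 t))) = true :=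
    fun hp => pref_snd_ne (Z := r3 (r2 (r1 t)))
      (repC_head_ne ['w','o','o'] (r2 (r1 t)) (by decide)
        (repC_head_ne ['y','e'] (r1 t) (by decide)
          (repC_head_ne ['a','y','a'] t (by decide) ht))) hp
  rw [chainR, r1_cons (pref_head_ne (by simp)),
      r2_cons (pref_head_ne (by simp)),
      r3_cons (pref_head_ne (by simp)),
      r4_cons hm2]

lemma chainR_maya_fail (r : List Char) :
    ∃ u, chainR ('m' :: 'a' :: 'y' :: 'a' :: r) = 'm' :: u := by
  refine ⟨r4 (r3 (r2 (' ' :: r1 r))), ?_⟩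
  have hm2 : ¬ ['m','a'].isPrefixOf ('m' :: ' ' :: r3 (r2 (r1 r))) = true :=
    fun hp => pref_snd_ne (Z := ' ' :: r3 (r2 (r1 r))) (by simp) hp
  rw [chainR, r1_cons (pref_head_ne (by simp)), r1_aya,
      r2_cons (pref_head_ne (by simp)), r2_cons (pref_head_ne (by simp)),
      r3_cons (pref_head_ne (by simp)), r3_cons (pref_head_ne (by simp)),
      r4_cons hm2,
      r4_cons (pref_head_ne (by simp))]

-- ================= MAIN LEMMA: A's residue is all spaces ↔ grammar membership ============
lemma main_lemma (s : List Char) : allSp (chainR s) ↔ Tx s = true := by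
  fun_induction Tx s with
  | case1 => simp [chainR_nil, allSp]
  | case2 r ih => rw [chainR_space, allSp_cons_sp]; exact ih
  | case3 r ih => rw [chainR_aya, allSp_cons_sp]; exact ih
  | case4 r ih => rw [chainR_ye, allSp_cons_sp]; exact ih
  | case5 r ih => rw [chainR_woo, allSp_cons_sp]; exact ih
  | case6 r ih =>
    by_cases hsh : ['a','y','a'].isPrefixOf ('a' :: r) = true
    · obtain ⟨rr, hrr⟩ := List.isPrefixOf_iff_prefix.mp hsh
      simp only [List.cons_append, List.nil_append, List.cons.injEq, true_and] at hrr
      subst hrr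
      obtain ⟨u, hu⟩ := chainR_maya_fail rr
      rw [hu, show Tx ('y' :: 'a' :: rr) = false from rfl]
      simp only [Bool.false_eq_true, iff_false]
      exact allSp_cons_ne (by decide) u
    · rw [chainR_ma r hsh, allSp_cons_sp]; exact ih
  | case7 x h1 h2 h3 h4 h5 h6 =>
    simp only [Bool.false_eq_true, iff_false]
    rcases x with _ | ⟨c, t⟩
    · exact (h1 rfl).elim
    have hsp : c ≠ ' ' := fun h => h2 t (h ▸ rfl)
    have hp1 : ¬ ['a','y','a'].isPrefixOf (c :: t) = true := by
      intro hp
      obtain ⟨r, hr⟩ := List.isPrefixOf_iff_prefix.mp hp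
      exact h3 r hr.symm
    by_cases hy : c = 'y'
    · subst hy
      have ht : t.head? ≠ some 'e' := by
        intro hh
        rcases t with _ | ⟨d, u⟩
        · simp at hh
        · simp only [List.head?_cons, Option.some.injEq] at hh
          exact h4 u (by rw [hh])
      obtain ⟨u, hu⟩ := chainR_y_fail t ht
      rw [hu]; exact allSp_cons_ne (by decide) u
    by_cases hw : c = 'w'
    · subst hw
      rcases t with _ | ⟨d, u⟩
      · obtain ⟨u, hu⟩ := chainR_w_fail1 [] (by simp)
        rw [hu]; exact allSp_cons_ne (by decide) u
      by_cases hd : d = 'o'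
      · subst hd
        have hu' : u.head? ≠ some 'o' := by
          intro hh
          rcases u with _ | ⟨e, v⟩
          · simp at hh
          · simp only [List.head?_cons, Option.some.injEq] at hh
            exact h5 v (by rw [hh])
        obtain ⟨v, hv⟩ := chainR_w_fail2 u hu'
        rw [hv]; exact allSp_cons_ne (c := 'w') (by decide) ('o' :: v)
      · obtain ⟨v, hv⟩ := chainR_w_fail1 (d :: u) (by simp [hd])
        rw [hv]; exact allSp_cons_ne (by decide) v
    by_cases hm : c = 'm'
    · subst hm
      have ht : t.head? ≠ some 'a' := by
        intro hh
        rcases t with _ | ⟨d, u⟩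
        · simp at hh
        · simp only [List.head?_cons, Option.some.injEq] at hh
          exact h6 u (by rw [hh])
      obtain ⟨u, hu⟩ := chainR_m_fail t ht
      rw [hu]; exact allSp_cons_ne (by decide) u
    · rw [chainR_cons_nomatch hp1 hy hw hm]
      exact allSp_cons_ne hsp _

-- ================= B-side characterisation =================
lemma Tx_eq_false (x : List Char)
    (h1 : x ≠ [])
    (h2 : ∀ r, x ≠ ' ' :: r) (h3 : ∀ r, x ≠ 'a' :: 'y' :: 'a' :: r)
    (h4 : ∀ r, x ≠ 'y' :: 'e' :: r) (h5 : ∀ r, x ≠ 'w' :: 'o' :: 'o' :: r)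
    (h6 : ∀ r, x ≠ 'm' :: 'a' :: r) : Tx x = false := by
  rw [Tx.eq_def]
  split <;> simp_all

lemma parseGo_isSome (s : List Char) : (parseGo s).isSome = Tx s := by
  fun_induction parseGo s with
  | case1 => rfl
  | case2 r ih => exact ih
  | case3 r ih => simpa using ih
  | case4 r ih => simpa using ih
  | case5 r ih => simpa using ih
  | case6 r ih => simpa using ih
  | case7 x h1 h2 h3 h4 h5 h6 => rw [Tx_eq_false x h1 h2 h3 h4 h5 h6]; rfl

lemma ex_nonspace_cons_sp (r : List Char) :
    (∃ c ∈ (' ' :: r), c ≠ ' ') ↔ ∃ c ∈ r, c ≠ ' ' := by simp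

lemma parseGo_pos (s : List Char) :
    ∀ n, parseGo s = some n → 0 ≤ n ∧ (0 < n ↔ ∃ c ∈ s, c ≠ ' ') := by
  fun_induction parseGo s with
  | case1 =>
    intro n hn
    simp only [Option.some.injEq] at hn
    subst hn
    simp
  | case2 r ih =>
    intro n hn
    obtain ⟨h0, hiff⟩ := ih n hn
    exact ⟨h0, by rw [hiff, ← ex_nonspace_cons_sp r]⟩
  | case3 r ih =>
    intro n hn
    simp only [Option.map_eq_some_iff] at hn
    obtain ⟨m, hm, rfl⟩ := hn
    have h0 := (ih m hm).1
    refine ⟨by omega, ⟨fun _ => ⟨'a', by simp, by decide⟩, fun _ => by omega⟩⟩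
  | case4 r ih =>
    intro n hn
    simp only [Option.map_eq_some_iff] at hn
    obtain ⟨m, hm, rfl⟩ := hn
    have h0 := (ih m hm).1
    refine ⟨by omega, ⟨fun _ => ⟨'y', by simp, by decide⟩, fun _ => by omega⟩⟩
  | case5 r ih =>
    intro n hn
    simp only [Option.map_eq_some_iff] at hn
    obtain ⟨m, hm, rfl⟩ := hn
    have h0 := (ih m hm).1
    refine ⟨by omega, ⟨fun _ => ⟨'w', by simp, by decide⟩, fun _ => by omega⟩⟩
  | case6 r ih =>
    intro n hn
    simp only [Option.map_eq_some_iff] at hn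
    obtain ⟨m, hm, rfl⟩ := hn
    have h0 := (ih m hm).1
    refine ⟨by omega, ⟨fun _ => ⟨'m', by simp, by decide⟩, fun _ => by omega⟩⟩
  | case7 x h1 h2 h3 h4 h5 h6 => intro n hn; simp at hn


-- ================= A-side characterisation =================
lemma stepW_fst (x : String) (n : Int) (w : String) (hw : w.toList ≠ []) :
    ((stepW (x, n) w).1).toList = repC w.toList [' '] x.toList := by
  unfold stepW
  by_cases h : PySem.Str.isIn w x
  · rw [if_pos h]
    simp only [PySem.Str.toList_replace]
    rw [replace_eq_repC _ _ hw]
    rfl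
  · rw [if_neg h]
    have hni : ¬ w.toList <:+: x.toList := by
      intro hi
      exact h (PySem.Str.isIn_iff_infix w x |>.mpr hi)
    rw [repC_id_of_not_infix _ _ hni]

lemma stepW_snd (x : String) (n : Int) (w : String) :
    (stepW (x, n) w).2 = n + 1 ∨ stepW (x, n) w = (x, n) := by
  unfold stepW
  by_cases h : PySem.Str.isIn w x
  · left; rw [if_pos h]
  · right; rw [if_neg h]

lemma stepW_allSp (x : String) (n : Int) (w : String)
    (hx : allSp x.toList) (hw : ∃ c ∈ w.toList, c ≠ ' ') :
    stepW (x, n) w = (x, n) := by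
  unfold stepW
  rw [if_neg]
  intro h
  obtain ⟨c, hc, hcne⟩ := hw
  have hi : w.toList <:+: x.toList := (PySem.Str.isIn_iff_infix w x).mp h
  exact hcne (hx c (hi.subset hc))

lemma foldW (L : List String) :
    (∀ w ∈ L, w.toList ≠ [] ∧ ∃ c ∈ w.toList, c ≠ ' ') →
    ∀ (x : String) (n : Int),
      ((List.foldl stepW (x, n) L).1.toList
          = L.foldl (fun cs w => repC w.toList [' '] cs) x.toList) ∧
      (n ≤ (List.foldl stepW (x, n) L).2) ∧
      ((List.foldl stepW (x, n) L).2 = n → List.foldl stepW (x, n) L = (x, n)) ∧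
      (allSp x.toList → List.foldl stepW (x, n) L = (x, n)) := by
  induction L with
  | nil => intro _ x n; exact ⟨rfl, le_refl n, fun _ => rfl, fun _ => rfl⟩
  | cons w L' ih =>
    intro hL x n
    have hw := hL w (by simp)
    have hL' : ∀ v ∈ L', v.toList ≠ [] ∧ ∃ c ∈ v.toList, c ≠ ' ' :=
      fun v hv => hL v (by simp [hv])
    rcases hq : stepW (x, n) w with ⟨y, m⟩
    have hfold : List.foldl stepW (x, n) (w :: L') = List.foldl stepW (y, m) L' := by
      simp [List.foldl, hq]
    have hy : y.toList = repC w.toList [' '] x.toList := by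
      have := stepW_fst x n w hw.1
      rw [hq] at this; exact this
    have hm : m = n + 1 ∨ (y, m) = (x, n) := by
      rcases stepW_snd x n w with h | h
      · left; rw [hq] at h; exact h
      · right; rw [hq] at h; exact h
    obtain ⟨ih1, ih2, ih3, ih4⟩ := ih hL' y m
    refine ⟨?_, ?_, ?_, ?_⟩
    · rw [hfold, ih1, List.foldl_cons, hy]
    · rw [hfold]
      rcases hm with h | h
      · omega
      · have : y = x ∧ m = n := by simpa [Prod.ext_iff] using h
        omega
    · rw [hfold]
      intro hz
      rcases hm with h | h
      · omega
      · have hyx : y = x ∧ m = n := by simpa [Prod.ext_iff] using h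
        rw [ih3 (by omega), hyx.1, hyx.2]
    · intro hx
      rw [hfold]
      have hq' : stepW (x, n) w = (x, n) := stepW_allSp x n w hx hw.2
      have : y = x ∧ m = n := by
        rw [hq] at hq'; simpa [Prod.ext_iff] using hq'
      rw [ih4 (by rw [this.1]; exact hx), this.1, this.2]

lemma repC_space_filter : ∀ l : List Char, repC [' '] [] l = l.filter (fun c => !(c == ' ')) := by
  intro l
  induction l with
  | nil => rw [repC_nil]; rfl
  | cons c t ih =>
    by_cases hc : c = ' '
    · subst hc
      rw [repC_pos _ _ _ _ (by simp [List.isPrefixOf])]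
      simpa using ih
    · rw [repC_neg _ _ _ _ (pref_head_ne
        (by simp only [List.head?_cons, ne_eq, Option.some.injEq]; exact hc)), ih, List.filter_cons]
      simp [hc]

-- the four words, as used in A's loop
lemma words_ok : ∀ w ∈ (["aya", "ye", "woo", "ma"] : List String),
    w.toList ≠ [] ∧ ∃ c ∈ w.toList, c ≠ ' ' := by
  intro w hw
  simp only [List.mem_cons, List.not_mem_nil, or_false] at hw
  rcases hw with rfl | rfl | rfl | rfl
  · exact ⟨by decide, 'a', by decide, by decide⟩
  · exact ⟨by decide, 'y', by decide, by decide⟩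
  · exact ⟨by decide, 'w', by decide, by decide⟩
  · exact ⟨by decide, 'm', by decide, by decide⟩

lemma aCond_iff (i0 : String) :
    (PySem.Str.len (PySem.Str.replace
        (List.foldl stepW (i0, (0 : Int)) ["aya", "ye", "woo", "ma"]).1 " " "") = 0 ∧
      (List.foldl stepW (i0, (0 : Int)) ["aya", "ye", "woo", "ma"]).2 > 0)
    ↔ (Tx i0.toList = true ∧ ∃ c ∈ i0.toList, c ≠ ' ') := by
  obtain ⟨hfst, hge, hzero, hallsp⟩ := foldW ["aya", "ye", "woo", "ma"] words_ok i0 0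
  set p := List.foldl stepW (i0, (0 : Int)) ["aya", "ye", "woo", "ma"] with hp
  have hchain : p.1.toList = chainR i0.toList := by
    rw [hfst]; rfl
  have hlen : PySem.Str.len (PySem.Str.replace p.1 " " "") = 0 ↔ allSp (chainR i0.toList) := by
    rw [PySem.Str.len_eq, PySem.Str.toList_replace,
        show (" " : String).toList = [' '] from rfl,
        show ("" : String).toList = [] from rfl,
        replace_eq_repC _ _ (by simp), repC_space_filter, hchain]
    simp only [Int.natCast_eq_zero, List.length_eq_zero_iff, List.filter_eq_nil_iff]
    constructor
    · intro h c hc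
      have := h c hc
      simpa using this
    · intro h c hc
      simp [h c hc]
  constructor
  · rintro ⟨h1, h2⟩
    have hT := (main_lemma i0.toList).mp (hlen.mp h1)
    refine ⟨hT, ?_⟩
    by_contra hno
    push Not at hno
    have : allSp i0.toList := fun c hc => hno c hc
    have := hallsp this
    rw [this] at h2
    simp at h2
  · rintro ⟨hT, c, hc, hcne⟩
    have hAS := (main_lemma i0.toList).mpr hT
    refine ⟨hlen.mpr hAS, ?_⟩
    rcases lt_or_eq_of_le hge with h | h
    · exact h
    · exfalso
      have hpx := hzero h.symm
      have : p.1 = i0 := by rw [hpx]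
      rw [this] at hchain
      exact hcne (hAS c (by rw [hchain] at hc; exact hc))

-- ================= the two per-string flags =================
def aBool (i0 : String) : Bool :=
  let p := List.foldl stepW (i0, (0 : Int)) ["aya", "ye", "woo", "ma"]
  decide (PySem.Str.len (PySem.Str.replace p.1 " " "") = 0 ∧ p.2 > 0)

def bBool (s : String) : Bool :=
  match scan s.toList.length s.toList 0 with
  | some n => decide (0 < n)
  | none => false

lemma bScan (s : String) : scan s.toList.length s.toList 0 = parseGo s.toList := by
  rw [scan_eq_parseGo s.toList s.toList.length 0 le_rfl]
  cases parseGo s.toList <;> simp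

lemma solution_eq_countP (l : List String) : solution l = ((l.countP aBool : Nat) : Int) := by
  unfold solution
  have hbody : ∀ (acc : Int) (i0 : String),
      (fun answer i0 =>
        let p := List.foldl stepW (i0, (0 : Int)) ["aya", "ye", "woo", "ma"]
        if PySem.Str.len (PySem.Str.replace p.1 " " "") = 0 ∧ p.2 > 0
        then answer + 1 else answer) acc i0
      = (fun acc x => if aBool x = true then acc + 1 else acc) acc i0 := by
    intro acc i0
    simp only [aBool, decide_eq_true_eq]
  rw [PySem.List.foldl_congr_mem l _ _ 0 (fun acc x _ => hbody acc x),
      PySem.List.foldl_count_if]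
  simp

lemma matchfold (acc : Int) (o : Option Int) :
    (match o with
      | some cnt => if cnt > 0 then acc + 1 else acc
      | none => acc)
    = if (match o with | some n => decide (0 < n) | none => false) = true
      then acc + 1 else acc := by
  cases o with
  | none => simp
  | some n => simp [gt_iff_lt]

lemma solution_alt_eq_countP (l : List String) :
    solution_alt l = ((l.countP bBool : Nat) : Int) := by
  unfold solution_alt
  have hbody : ∀ (acc : Int) (s : String),
      (fun answer s =>
        match scan s.toList.length s.toList 0 with
        | some cnt => if cnt > 0 then answer + 1 else answer
        | none => answer) acc s
      = (fun acc x => if bBool x = true then acc + 1 else acc) acc s := by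
    intro acc s
    simp only [bBool]
    exact matchfold acc (scan s.toList.length s.toList 0)
  rw [PySem.List.foldl_congr_mem l _ _ 0 (fun acc x _ => hbody acc x),
      PySem.List.foldl_count_if]
  simp

lemma aBool_iff (s : String) :
    aBool s = true ↔ (Tx s.toList = true ∧ ∃ c ∈ s.toList, c ≠ ' ') := by
  simp only [aBool, decide_eq_true_eq]
  exact aCond_iff s

lemma bBool_iff (s : String) :
    bBool s = true ↔ (Tx s.toList = true ∧ ∃ c ∈ s.toList, c ≠ ' ') := by
  unfold bBool
  rw [bScan s]
  have hiso := parseGo_isSome s.toList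
  cases hpg : parseGo s.toList with
  | none =>
    rw [hpg] at hiso
    simp only [Option.isSome_none] at hiso
    constructor
    · intro h; simp at h
    · rintro ⟨hT, _⟩
      rw [hT] at hiso
      simp at hiso
  | some n =>
    rw [hpg] at hiso
    simp only [Option.isSome_some] at hiso
    obtain ⟨_, hiff⟩ := parseGo_pos s.toList n hpg
    simp only [decide_eq_true_eq]
    constructor
    · intro h
      exact ⟨hiso.symm, hiff.mp h⟩
    · rintro ⟨_, hex⟩
      exact hiff.mpr hex

lemma flags_agree (s : String) : aBool s = bBool s := by
  by_cases h : (Tx s.toList = true ∧ ∃ c ∈ s.toList, c ≠ ' ')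
  · rw [(aBool_iff s).mpr h, (bBool_iff s).mpr h]
  · have ha : aBool s = false := by
      cases hA : aBool s
      · rfl
      · exact absurd ((aBool_iff s).mp hA) h
    have hb : bBool s = false := by
      cases hB : bBool s
      · rfl
      · exact absurd ((bBool_iff s).mp hB) h
    rw [ha, hb]

-- ===== VERDICT (by name: the statement is the Claim_ definition above) =====
theorem solution_spec : Claim_equal_solution := by
  intro babbling _
  show solution babbling = solution_alt babbling
  rw [solution_eq_countP, solution_alt_eq_countP,
      List.countP_congr (fun s _ => by rw [flags_agree s])]
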